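-- pv_equiv track=rewrite | github.com/AustinSalter/keel | substrate/spotify_context.py | _infer_aesthetics
-- ===== SOURCE A (Python) =====
-- _AESTHETIC_SIGNALS: list[tuple[list[str], str]] = [
--     (
--         ["indie", "indie rock", "indie pop", "oxford indie"],
--         "a valuing of authenticity over polish",
--     ),
--     (
--         ["psychedelic", "psychedelic rock", "dream pop", "shoegaze"],
--         "an attraction to atmospheric textures and layered sonic worlds",
--     ),
--     (
--         ["funk", "soul", "funk rock", "r&b"],
--         "a groove-oriented sensibility where rhythm and feel come first",
--     ),
--     (
--         ["ambient", "drone", "new age"],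
--         "comfort with slowness and immersive, non-narrative sound",
--     ),
--     (
--         ["electronic", "techno", "intelligent dance music", "idm", "experimental electronic"],
--         "curiosity about the boundary between machine precision and human expression",
--     ),
--     (
--         ["hip hop", "rap", "conscious hip hop", "west coast rap"],
--         "an engagement with lyrical density and the storytelling power of rhythm",
--     ),
--     (
--         ["folk", "acoustic", "chamber folk", "singer-songwriter"],
--         "intimacy and stripped-back craft — the voice and the song above all else",
--     ),
--     (
--         ["jazz", "jazz fusion", "bebop"],
--         "an appreciation for improvisation and the tension between structure and freedom",
--     ),
--     (
--         ["classical", "contemporary classical", "neo-classical"],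
--         "patience with long-form compositional arcs and dynamic restraint",
--     ),
--     (
--         ["post-punk", "art punk", "new wave", "art rock"],
--         "restlessness with convention and a tendency toward angular, self-aware music",
--     ),
--     (
--         ["alternative rock", "alternative", "permanent wave"],
--         "a taste for emotional directness wrapped in distortion and minor keys",
--     ),
--     (
--         ["metal", "heavy metal", "doom metal", "black metal"],
--         "an appetite for extremity and cathartic intensity",
--     ),
-- ]
--
-- def _infer_aesthetics(genres: list[str]) -> list[str]:
--     """Return a list of aesthetic signal strings triggered by the given genres."""
--     genre_set = {g.lower() for g in genres}
--     signals: list[str] = []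
--     seen: set[str] = set()
--     for keywords, signal in _AESTHETIC_SIGNALS:
--         if any(kw in genre_set for kw in keywords) and signal not in seen:
--             signals.append(signal)
--             seen.add(signal)
--     return signals
-- ===== SOURCE B (Python) =====
-- _AESTHETIC_SIGNALS: list[tuple[list[str], str]] = [
--     (
--         ["indie", "indie rock", "indie pop", "oxford indie"],
--         "a valuing of authenticity over polish",
--     ),
--     (
--         ["psychedelic", "psychedelic rock", "dream pop", "shoegaze"],
--         "an attraction to atmospheric textures and layered sonic worlds",
--     ),
--     (
--         ["funk", "soul", "funk rock", "r&b"],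
--         "a groove-oriented sensibility where rhythm and feel come first",
--     ),
--     (
--         ["ambient", "drone", "new age"],
--         "comfort with slowness and immersive, non-narrative sound",
--     ),
--     (
--         ["electronic", "techno", "intelligent dance music", "idm", "experimental electronic"],
--         "curiosity about the boundary between machine precision and human expression",
--     ),
--     (
--         ["hip hop", "rap", "conscious hip hop", "west coast rap"],
--         "an engagement with lyrical density and the storytelling power of rhythm",
--     ),
--     (
--         ["folk", "acoustic", "chamber folk", "singer-songwriter"],
--         "intimacy and stripped-back craft — the voice and the song above all else",
--     ),
--     (
--         ["jazz", "jazz fusion", "bebop"],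
--         "an appreciation for improvisation and the tension between structure and freedom",
--     ),
--     (
--         ["classical", "contemporary classical", "neo-classical"],
--         "patience with long-form compositional arcs and dynamic restraint",
--     ),
--     (
--         ["post-punk", "art punk", "new wave", "art rock"],
--         "restlessness with convention and a tendency toward angular, self-aware music",
--     ),
--     (
--         ["alternative rock", "alternative", "permanent wave"],
--         "a taste for emotional directness wrapped in distortion and minor keys",
--     ),
--     (
--         ["metal", "heavy metal", "doom metal", "black metal"],
--         "an appetite for extremity and cathartic intensity",
--     ),
-- ]
--
-- # Precomputed once: the signal texts in table order, and an inverted index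
-- # keyword -> row number in that table.
-- _SIGNAL_TEXTS: list[str] = [sig for _kws, sig in _AESTHETIC_SIGNALS]
-- _KW_ROW: dict[str, int] = {
--     kw: i for i, (kws, _sig) in enumerate(_AESTHETIC_SIGNALS) for kw in kws
-- }
--
-- def _infer_aesthetics(genres: list[str]) -> list[str]:
--     """Return a list of aesthetic signal strings triggered by the given genres."""
--     flags = [False] * len(_SIGNAL_TEXTS)
--     for g in genres:
--         i = _KW_ROW.get(g.lower())
--         if i is not None:
--             flags[i] = True
--     return [sig for hit, sig in zip(flags, _SIGNAL_TEXTS) if hit]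
-- ===== Notes on version B (the rewrite author's own statement) =====
-- stated objective: alternative
-- what changed: A scans all 12 table rows per call, testing every keyword against a set of lowered genres and deduplicating with a 'seen' set; B precomputes a keyword-to-row inverted index once, marks a fixed boolean flags array with one dict lookup per genre, and emits the signals by zipping the flags with the signal texts, so the per-row keyword scan and the seen-set disappear.
import Mathlib
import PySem

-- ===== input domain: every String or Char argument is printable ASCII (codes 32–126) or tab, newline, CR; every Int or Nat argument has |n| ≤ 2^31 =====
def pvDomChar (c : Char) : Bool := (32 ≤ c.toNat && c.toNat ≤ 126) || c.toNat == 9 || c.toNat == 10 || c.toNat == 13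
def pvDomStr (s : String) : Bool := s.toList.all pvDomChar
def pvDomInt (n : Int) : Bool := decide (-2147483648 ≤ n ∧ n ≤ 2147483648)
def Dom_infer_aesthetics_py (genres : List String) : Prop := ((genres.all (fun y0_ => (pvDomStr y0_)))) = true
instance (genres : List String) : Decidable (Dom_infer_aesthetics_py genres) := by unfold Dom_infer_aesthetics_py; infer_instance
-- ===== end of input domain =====

-- B replaces A's per-row keyword scan over the lowered-genre set (with a 'seen' dedup set)
-- by a precomputed keyword→row inverted index, a boolean flags array marked by one dict
-- lookup per genre, and a final zip of the flags with the signal texts (objective: alternative).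

-- ===== PORT A =====
def aestheticSignals : List (List String × String) := [
  (["indie", "indie rock", "indie pop", "oxford indie"], "a valuing of authenticity over polish"),
  (["psychedelic", "psychedelic rock", "dream pop", "shoegaze"], "an attraction to atmospheric textures and layered sonic worlds"),
  (["funk", "soul", "funk rock", "r&b"], "a groove-oriented sensibility where rhythm and feel come first"),
  (["ambient", "drone", "new age"], "comfort with slowness and immersive, non-narrative sound"),
  (["electronic", "techno", "intelligent dance music", "idm", "experimental electronic"], "curiosity about the boundary between machine precision and human expression"),
  (["hip hop", "rap", "conscious hip hop", "west coast rap"], "an engagement with lyrical density and the storytelling power of rhythm"),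
  (["folk", "acoustic", "chamber folk", "singer-songwriter"], "intimacy and stripped-back craft — the voice and the song above all else"),
  (["jazz", "jazz fusion", "bebop"], "an appreciation for improvisation and the tension between structure and freedom"),
  (["classical", "contemporary classical", "neo-classical"], "patience with long-form compositional arcs and dynamic restraint"),
  (["post-punk", "art punk", "new wave", "art rock"], "restlessness with convention and a tendency toward angular, self-aware music"),
  (["alternative rock", "alternative", "permanent wave"], "a taste for emotional directness wrapped in distortion and minor keys"),
  (["metal", "heavy metal", "doom metal", "black metal"], "an appetite for extremity and cathartic intensity")
]

-- A: genre_set = {g.lower() for g in genres}; scan the table appending each signal whose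
-- keyword list meets genre_set, guarded by the 'seen' set.
def infer_aesthetics_py (genres : List String) : List String :=
  let genreSet : PySem.Set String := PySem.Set.ofList (genres.map PySem.Str.lower)
  (aestheticSignals.foldl
    (fun (acc : List String × PySem.Set String) kv =>
      if kv.1.any (fun kw => genreSet.contains kw) && !(acc.2.contains kv.2)
      then (acc.1 ++ [kv.2], PySem.Set.add acc.2 kv.2)
      else acc)
    ([], PySem.Set.empty)).1

-- ===== PORT B =====
-- _SIGNAL_TEXTS = [sig for _kws, sig in _AESTHETIC_SIGNALS]  (a module-level literal)
def signalTexts : List String := [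
  "a valuing of authenticity over polish",
  "an attraction to atmospheric textures and layered sonic worlds",
  "a groove-oriented sensibility where rhythm and feel come first",
  "comfort with slowness and immersive, non-narrative sound",
  "curiosity about the boundary between machine precision and human expression",
  "an engagement with lyrical density and the storytelling power of rhythm",
  "intimacy and stripped-back craft — the voice and the song above all else",
  "an appreciation for improvisation and the tension between structure and freedom",
  "patience with long-form compositional arcs and dynamic restraint",
  "restlessness with convention and a tendency toward angular, self-aware music",
  "a taste for emotional directness wrapped in distortion and minor keys",
  "an appetite for extremity and cathartic intensity"]

-- _KW_ROW = {kw: i for i, (kws, _sig) in enumerate(_AESTHETIC_SIGNALS) for kw in kws}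
-- (a module-level constant; written out as the literal dict it evaluates to)
def kwRow : PySem.Dict String Int := PySem.Dict.ofList [
  ("indie", 0), ("indie rock", 0), ("indie pop", 0), ("oxford indie", 0),
  ("psychedelic", 1), ("psychedelic rock", 1), ("dream pop", 1), ("shoegaze", 1),
  ("funk", 2), ("soul", 2), ("funk rock", 2), ("r&b", 2),
  ("ambient", 3), ("drone", 3), ("new age", 3),
  ("electronic", 4), ("techno", 4), ("intelligent dance music", 4), ("idm", 4), ("experimental electronic", 4),
  ("hip hop", 5), ("rap", 5), ("conscious hip hop", 5), ("west coast rap", 5),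
  ("folk", 6), ("acoustic", 6), ("chamber folk", 6), ("singer-songwriter", 6),
  ("jazz", 7), ("jazz fusion", 7), ("bebop", 7),
  ("classical", 8), ("contemporary classical", 8), ("neo-classical", 8),
  ("post-punk", 9), ("art punk", 9), ("new wave", 9), ("art rock", 9),
  ("alternative rock", 10), ("alternative", 10), ("permanent wave", 10),
  ("metal", 11), ("heavy metal", 11), ("doom metal", 11), ("black metal", 11)]

-- flags = [False]*len(_SIGNAL_TEXTS); for g in genres: i = _KW_ROW.get(g.lower());
-- if i is not None: flags[i] = True     (flags[i]=True is pySetD; i is always a row index 0..11)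
def bFlags (genres : List String) : List Bool :=
  genres.foldl
    (fun fl g =>
      match kwRow.get? (PySem.Str.lower g) with
      | some i => PySem.List.pySetD fl i true
      | none => fl)
    (List.replicate signalTexts.length false)

-- [sig for hit, sig in zip(flags, _SIGNAL_TEXTS) if hit]
def infer_aesthetics_py_alt (genres : List String) : List String :=
  (((bFlags genres).zip signalTexts).filter (fun p => p.1)).map (fun p => p.2)

-- ===== PRECONDITION & SPEC =====
def Spec_infer_aesthetics_py (genres : List String) (out : List String) : Prop := out = infer_aesthetics_py_alt genres
instance (genres : List String) (out : List String) : Decidable (Spec_infer_aesthetics_py genres out) := by unfold Spec_infer_aesthetics_py; infer_instance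

-- ===== CLAIM (what is proved, stated in full; the proofs are below) =====
def Claim_equal_infer_aesthetics_py : Prop := ∀ (genres : List String), Dom_infer_aesthetics_py genres → Spec_infer_aesthetics_py genres (infer_aesthetics_py genres)

-- ===== LEMMAS AND PROOFS =====

-- A's fold, with pairwise-distinct pending signals none of which is in 'seen', is the
-- filter of the table by "some keyword is in the genre set", mapped to signals.
theorem foldA_eq (cond : String → Bool) :
    ∀ (l : List (List String × String)) (acc : List String) (seen : PySem.Set String),
      (l.map (·.2)).Nodup → (∀ kv ∈ l, kv.2 ∉ seen) →
      (l.foldl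
        (fun (a : List String × PySem.Set String) kv =>
          if kv.1.any cond && !(a.2.contains kv.2)
          then (a.1 ++ [kv.2], PySem.Set.add a.2 kv.2)
          else a)
        (acc, seen)).1
        = acc ++ (l.filter (fun kv => kv.1.any cond)).map (·.2) := by
  intro l
  induction l with
  | nil => intro acc seen _ _; simp
  | cons kv t ih =>
    intro acc seen hnd hseen
    have hkv : kv.2 ∉ seen := hseen kv (List.mem_cons_self)
    have hcon : seen.contains kv.2 = false := by
      rw [Bool.eq_false_iff]; intro h; exact hkv ((PySem.Set.contains_iff _ _).mp h)
    simp only [List.map_cons, List.nodup_cons] at hnd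
    by_cases hc : kv.1.any cond = true
    · simp only [List.foldl_cons, hc, hcon, Bool.not_false, Bool.and_true, if_true]
      rw [ih (acc ++ [kv.2]) (PySem.Set.add seen kv.2) hnd.2 ?_]
      · simp [hc]
      · intro kv' h' hmem
        rcases (PySem.Set.mem_add _ _ _).mp hmem with h | h
        · exact hseen kv' (List.mem_cons_of_mem _ h') h
        · exact hnd.1 (h ▸ List.mem_map_of_mem h')
    · have hc' : kv.1.any cond = false := by rwa [Bool.not_eq_true] at hc
      simp only [List.foldl_cons, hc', Bool.false_and, Bool.false_eq_true, if_false]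
      rw [ih acc seen hnd.2 (fun kv' h' => hseen kv' (List.mem_cons_of_mem _ h'))]
      simp [hc']

set_option maxRecDepth 10000 in
theorem kwRow_keys_nodup : kwRow.keys.Nodup := by decide

set_option maxRecDepth 100000 in
theorem kwRow_items : kwRow.items = [("indie", (0 : Int)), ("indie rock", (0 : Int)), ("indie pop", (0 : Int)), ("oxford indie", (0 : Int)), ("psychedelic", (1 : Int)), ("psychedelic rock", (1 : Int)), ("dream pop", (1 : Int)), ("shoegaze", (1 : Int)), ("funk", (2 : Int)), ("soul", (2 : Int)), ("funk rock", (2 : Int)), ("r&b", (2 : Int)), ("ambient", (3 : Int)), ("drone", (3 : Int)), ("new age", (3 : Int)), ("electronic", (4 : Int)), ("techno", (4 : Int)), ("intelligent dance music", (4 : Int)), ("idm", (4 : Int)), ("experimental electronic", (4 : Int)), ("hip hop", (5 : Int)), ("rap", (5 : Int)), ("conscious hip hop", (5 : Int)), ("west coast rap", (5 : Int)), ("folk", (6 : Int)), ("acoustic", (6 : Int)), ("chamber folk", (6 : Int)), ("singer-songwriter", (6 : Int)), ("jazz", (7 : Int)), ("jazz fusion", (7 : Int)), ("bebop", (7 :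 Int)), ("classical", (8 : Int)), ("contemporary classical", (8 : Int)), ("neo-classical", (8 : Int)), ("post-punk", (9 : Int)), ("art punk", (9 : Int)), ("new wave", (9 : Int)), ("art rock", (9 : Int)), ("alternative rock", (10 : Int)), ("alternative", (10 : Int)), ("permanent wave", (10 : Int)), ("metal", (11 : Int)), ("heavy metal", (11 : Int)), ("doom metal", (11 : Int)), ("black metal", (11 : Int))] := by decide

theorem kw_get (s : String) (i : Int) :
    kwRow.get? s = some i ↔ (s, i) ∈ kwRow.items :=
  PySem.Dict.get?_eq_some_iff_mem_items _ _ _ kwRow_keys_nodup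

set_option maxRecDepth 100000 in
theorem kwRow_val_bound (s : String) (i : Int) (h : kwRow.get? s = some i) :
    0 ≤ i ∧ i < 12 := by
  have hm := (kw_get s i).mp h
  rw [kwRow_items] at hm
  fin_cases hm <;> omega

-- "row k is triggered by some genre"
def trig (genres : List String) (k : Nat) : Bool :=
  genres.any (fun g => kwRow.get? (PySem.Str.lower g) == some (k : Int))

set_option maxRecDepth 100000 in
theorem bFold_length (genres : List String) :
    ∀ (fl : List Bool),
      (genres.foldl
        (fun fl g =>
          match kwRow.get? (PySem.Str.lower g) with
          | some i => PySem.List.pySetD fl i true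
          | none => fl) fl).length = fl.length := by
  induction genres with
  | nil => intro fl; rfl
  | cons g t ih =>
    intro fl
    simp only [List.foldl_cons]
    cases hg : kwRow.get? (PySem.Str.lower g) with
    | none => exact ih fl
    | some i => rw [ih]; exact PySem.List.length_pySetD ..

set_option maxRecDepth 100000 in
theorem bFold_get (genres : List String) :
    ∀ (fl : List Bool) (k : Nat) (hk : k < fl.length),
      (genres.foldl
        (fun fl g =>
          match kwRow.get? (PySem.Str.lower g) with
          | some i => PySem.List.pySetD fl i true
          | none => fl) fl)[k]?
      = some (fl[k] || trig genres k) := by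
  induction genres with
  | nil =>
    intro fl k hk
    simp [trig, List.getElem?_eq_getElem hk]
  | cons g t ih =>
    intro fl k hk
    simp only [List.foldl_cons]
    have htrig : trig (g :: t) k
        = ((kwRow.get? (PySem.Str.lower g) == some (k : Int)) || trig t k) := by
      simp [trig]
    cases hg : kwRow.get? (PySem.Str.lower g) with
    | none =>
      rw [ih fl k hk, htrig, hg]
      simp
    | some i =>
      obtain ⟨hge, _⟩ := kwRow_val_bound _ _ hg
      have hset : PySem.List.pySetD fl i true = fl.set i.toNat true :=
        PySem.List.pySetD_of_nonneg fl true hge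
      have hk' : k < (PySem.List.pySetD fl i true).length := by
        rw [PySem.List.length_pySetD]; exact hk
      rw [ih _ k hk', htrig]
      by_cases hik : i = (k : Int)
      · have : i.toNat = k := by omega
        simp [hik, hg]
      · have hne : i.toNat ≠ k := by omega
        have hbeq : (some i == some (k : Int)) = false := by
          simp [hik]
        simp [hset, hne, hg, hbeq]

-- zip-with-flags filtering equals filtering the table, when the flags agree with the
-- table condition row by row.
theorem zip_filter_eq (cA : List String × String → Bool) :
    ∀ (l : List (List String × String)) (t : List Bool),
      (ht : t.length = l.length) →
      (∀ (k : Nat) (hk : k < l.length), t[k]'(by rw [ht]; exact hk) = cA (l[k])) →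
      ((t.zip (l.map (·.2))).filter (fun p => p.1)).map (fun p => p.2)
        = (l.filter cA).map (·.2) := by
  intro l
  induction l with
  | nil => intro t ht _; rw [List.length_nil, List.length_eq_zero_iff] at ht; simp [ht]
  | cons kv rest ih =>
    intro t ht hag
    cases t with
    | nil => simp at ht
    | cons b t' =>
      have hb : b = cA kv := hag 0 (by simp)
      simp only [List.map_cons, List.zip_cons_cons, List.filter_cons, hb]
      by_cases hc : cA kv = true
      · simp only [hc, if_true, List.map_cons]
        rw [ih t' (by simpa using ht) (fun k hk => hag (k + 1) (by simpa using hk))]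
      · have hc' : cA kv = false := by rwa [Bool.not_eq_true] at hc
        simp only [hc', Bool.false_eq_true, if_false]
        exact ih t' (by simpa using ht) (fun k hk => hag (k + 1) (by simpa using hk))

-- per-row condition equality: triggered-by-lookup = some keyword of the row is a lowered genre
theorem trig_eq (genres : List String) (k : Nat) (kws : List String)
    (hiff : ∀ s : String, kwRow.get? s = some (k : Int) ↔ s ∈ kws) :
    trig genres k
      = kws.any (fun kw => (PySem.Set.ofList (genres.map PySem.Str.lower)).contains kw) := by
  rw [Bool.eq_iff_iff]
  simp only [trig, List.any_eq_true, beq_iff_eq, PySem.Set.contains_iff,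
    PySem.Set.mem_ofList, List.mem_map]
  constructor
  · rintro ⟨g, hg, h⟩
    exact ⟨PySem.Str.lower g, (hiff _).mp h, g, hg, rfl⟩
  · rintro ⟨kw, hkw, g, hg, rfl⟩
    exact ⟨g, hg, (hiff _).mpr hkw⟩

-- ===== VERDICT (by name: the statement is the Claim_ definition above) =====
set_option maxRecDepth 100000 in
theorem infer_aesthetics_py_spec : Claim_equal_infer_aesthetics_py := by
  intro genres _
  unfold Spec_infer_aesthetics_py infer_aesthetics_py infer_aesthetics_py_alt
  rw [foldA_eq _ aestheticSignals [] PySem.Set.empty (by decide) (by intro kv _ h; cases h)]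
  have hst : signalTexts = aestheticSignals.map (·.2) := by rfl
  rw [List.nil_append, hst,
      zip_filter_eq
        (fun kv => kv.1.any (fun kw =>
          (PySem.Set.ofList (genres.map PySem.Str.lower)).contains kw))
        aestheticSignals (bFlags genres) ?hlen ?hag]
  case hlen =>
    unfold bFlags
    rw [bFold_length]
    decide
  case hag =>
    intro k hk
    have hk12 : k < 12 := by simpa using hk
    have hrep : k < (List.replicate signalTexts.length false).length := by
      simpa using hk12
    have hget := bFold_get genres (List.replicate signalTexts.length false) k hrep
    have hbk : k < (bFlags genres).length := by unfold bFlags; rw [bFold_length]; exact hrep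
    have : (bFlags genres)[k]'hbk = trig genres k := by
      have h2 : (bFlags genres)[k]? = some ((bFlags genres)[k]'hbk) :=
        List.getElem?_eq_getElem hbk
      unfold bFlags at h2
      rw [hget] at h2
      have := Option.some.inj h2
      simp only [List.getElem_replicate, Bool.false_or] at this
      exact this.symm
    rw [this]
    interval_cases k <;>
      · apply trig_eq
        intro s
        rw [kw_get, kwRow_items]
        simp only [List.mem_cons, List.not_mem_nil, or_false, Prod.mk.injEq]
        simp [aestheticSignals]
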